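-- pv_equiv track=rewrite | github.com/miniyk2012/leetcode | leetcode_projects/leetcode_947/error_solution.py | build_row_col_index
-- ===== SOURCE A (Python) =====
-- def build_row_col_index(stones):
--     row_index = dict()
--     col_index = dict()
--     for stone in stones:
--         x, y = stone[0], stone[1]
--         if x not in col_index:
--             col_index[x] = set([y])
--         else:
--             col_index[x].add(y)
--         if y not in row_index:
--             row_index[y] = set([x])
--         else:
--             row_index[y].add(x)
--     for k in row_index.keys():
--         row_index[k] = sorted(list(row_index[k]))
--     for k in col_index.keys():
--         col_index[k] = sorted(list(col_index[k]))
--     return row_index, col_index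
-- ===== SOURCE B (Python) =====
-- def build_row_col_index(stones):
--     ys = list(dict.fromkeys(s[1] for s in stones))
--     xs = list(dict.fromkeys(s[0] for s in stones))
--     row_index = {y: sorted({s[0] for s in stones if s[1] == y}) for y in ys}
--     col_index = {x: sorted({s[1] for s in stones if s[0] == x}) for x in xs}
--     return row_index, col_index
-- ===== Notes on version B (the rewrite author's own statement) =====
-- stated objective: alternative
-- what changed: B builds no accumulator dicts in a stone loop: it first lists the distinct y and x keys in first-occurrence order, then for each key rescans the stones collecting the matching coordinates (nested passes, sorted-set per key), instead of A's single pass maintaining two dicts of sets plus extra key loops rewriting each entry with sorted(list(set)).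
import Mathlib
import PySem

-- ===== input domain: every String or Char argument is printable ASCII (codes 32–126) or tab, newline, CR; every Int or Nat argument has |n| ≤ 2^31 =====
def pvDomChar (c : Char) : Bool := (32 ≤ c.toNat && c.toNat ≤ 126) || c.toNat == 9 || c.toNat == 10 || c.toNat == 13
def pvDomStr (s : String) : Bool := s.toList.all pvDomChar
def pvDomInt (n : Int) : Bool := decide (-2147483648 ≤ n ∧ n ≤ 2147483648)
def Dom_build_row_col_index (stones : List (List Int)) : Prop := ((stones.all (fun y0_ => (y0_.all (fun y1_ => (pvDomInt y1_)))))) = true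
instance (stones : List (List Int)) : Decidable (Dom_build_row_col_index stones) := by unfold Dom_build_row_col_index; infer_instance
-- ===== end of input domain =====

-- B drops A's accumulator dicts of sets: it lists the distinct keys in first-occurrence
-- order and rescans the stones once per key (objective: alternative).

-- ===== PORT A =====
-- literal transliteration of Source A: one loop building two dicts of sets
-- (x, y = stone[0], stone[1] is pyGetD under Pre_), then two loops over keys
-- rewriting each entry to sorted(list(set)); dicts returned as their items lists.
def build_row_col_index (stones : List (List Int)) : (List (Int × List Int)) × (List (Int × List Int)) :=
  let p := stones.foldl
    (fun (acc : PySem.Dict Int (PySem.Set Int) × PySem.Dict Int (PySem.Set Int)) stone =>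
      (-- if y not in row_index: row_index[y] = set([x]) else row_index[y].add(x)
       (if acc.1.contains (PySem.List.pyGetD stone 1 0) = false then
          acc.1.insert (PySem.List.pyGetD stone 1 0) (PySem.Set.ofList [PySem.List.pyGetD stone 0 0])
        else
          acc.1.modify (PySem.List.pyGetD stone 1 0) PySem.Set.empty
            (fun s => PySem.Set.add s (PySem.List.pyGetD stone 0 0))),
       -- if x not in col_index: col_index[x] = set([y]) else col_index[x].add(y)
       (if acc.2.contains (PySem.List.pyGetD stone 0 0) = false then
          acc.2.insert (PySem.List.pyGetD stone 0 0) (PySem.Set.ofList [PySem.List.pyGetD stone 1 0])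
        else
          acc.2.modify (PySem.List.pyGetD stone 0 0) PySem.Set.empty
            (fun s => PySem.Set.add s (PySem.List.pyGetD stone 1 0)))))
    (PySem.Dict.empty, PySem.Dict.empty)
  let row := p.1.keys.foldl
    (fun d k => d.insert k (PySem.List.sorted (d.getD k PySem.Set.empty) (fun v => v))) p.1
  let col := p.2.keys.foldl
    (fun d k => d.insert k (PySem.List.sorted (d.getD k PySem.Set.empty) (fun v => v))) p.2
  (row.items, col.items)

-- ===== PORT B =====
-- literal transliteration of Source B: list(dict.fromkeys(...)) is PySem.Set.ofList
-- (distinct elements in first-occurrence order); each dict comprehension maps every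
-- key to sorted of the set comprehension over a fresh scan of stones.
def build_row_col_index_alt (stones : List (List Int)) : (List (Int × List Int)) × (List (Int × List Int)) :=
  let ys := PySem.Set.ofList (stones.map (fun s => PySem.List.pyGetD s 1 0))
  let xs := PySem.Set.ofList (stones.map (fun s => PySem.List.pyGetD s 0 0))
  let row_index := ys.map (fun y => (y, PySem.List.sorted
    (PySem.Set.ofList ((stones.filter (fun s => PySem.List.pyGetD s 1 0 == y)).map
      (fun s => PySem.List.pyGetD s 0 0))) (fun v => v)))
  let col_index := xs.map (fun x => (x, PySem.List.sorted
    (PySem.Set.ofList ((stones.filter (fun s => PySem.List.pyGetD s 0 0 == x)).map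
      (fun s => PySem.List.pyGetD s 1 0))) (fun v => v)))
  (row_index, col_index)

-- ===== PRECONDITION & SPEC =====
-- A does stone[0] / stone[1]: a stone with fewer than two entries raises IndexError (B raises too).
def Pre_build_row_col_index (stones : List (List Int)) : Prop := ∀ s ∈ stones, 2 ≤ s.length
instance (stones : List (List Int)) : Decidable (Pre_build_row_col_index stones) := by
  unfold Pre_build_row_col_index; infer_instance
def pvWitness_build_row_col_index : List (List Int) := [[0, 0], [1, 2], [0, 2]]

def Spec_build_row_col_index (stones : List (List Int)) (out : (List (Int × List Int)) × (List (Int × List Int))) : Prop := out = build_row_col_index_alt stones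
instance (stones : List (List Int)) (out : (List (Int × List Int)) × (List (Int × List Int))) : Decidable (Spec_build_row_col_index stones out) := by unfold Spec_build_row_col_index; infer_instance

-- ===== CLAIM (what is proved, stated in full; the proofs are below) =====
def Claim_equal_build_row_col_index : Prop := ∀ (stones : List (List Int)), Dom_build_row_col_index stones → Pre_build_row_col_index stones → Spec_build_row_col_index stones (build_row_col_index stones)

-- ===== LEMMAS AND PROOFS =====

-- A's branch equals one Dict.modify
theorem astep_eq_modify (d : PySem.Dict Int (PySem.Set Int)) (x y : Int) :
    (if d.contains x = false then d.insert x (PySem.Set.ofList [y])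
     else d.modify x PySem.Set.empty (fun s => PySem.Set.add s y))
      = d.modify x PySem.Set.empty (fun s => PySem.Set.add s y) := by
  cases h : d.contains x with
  | false =>
    simp [PySem.Dict.modify, PySem.Dict.getD_of_not_contains d _ h]
    rfl
  | true => simp

-- getD of a modify fold: the filtered fold of the per-key values
theorem getD_foldl_modify_general (l : List (List Int)) (kf : List Int → Int)
    (g : PySem.Set Int → List Int → PySem.Set Int) (d : PySem.Dict Int (PySem.Set Int)) (c : Int) :
    (l.foldl (fun d s => d.modify (kf s) [] (fun t => g t s)) d).getD c []
      = (l.filter (fun s => kf s == c)).foldl g (d.getD c []) := by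
  induction l generalizing d with
  | nil => rfl
  | cons s t ih =>
    simp only [List.foldl_cons, List.filter_cons]
    rw [ih]
    by_cases h : kf s = c
    · subst h
      simp
    · simp [h, PySem.Dict.getD_modify, Ne.symm h]

-- rewriting every existing key in place maps the items list
theorem items_foldl_rewrite (ks : List Int) (d : PySem.Dict Int (PySem.Set Int))
    (f : PySem.Set Int → List Int) (hnd : ks.Nodup) (hsub : ∀ k ∈ ks, d.contains k = true) :
    (ks.foldl (fun d k => d.insert k (f (d.getD k []))) d).items
      = d.items.map (fun p => if p.1 ∈ ks then (p.1, f (d.getD p.1 [])) else p) := by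
  induction ks generalizing d with
  | nil => simp
  | cons k t ih =>
    have hk : d.contains k = true := hsub k (by simp)
    have hknt : k ∉ t := (List.nodup_cons.mp hnd).1
    simp only [List.foldl_cons]
    rw [ih (d.insert k (f (d.getD k []))) (List.nodup_cons.mp hnd).2
        (by intro c hc; rw [PySem.Dict.contains_insert]
            simp [hsub c (by simp [hc])]),
      PySem.Dict.items_insert_of_contains d _ hk, List.map_map]
    apply List.map_congr_left
    intro p _
    by_cases hp : p.1 = k
    · simp only [Function.comp, hp, beq_self_eq_true]
      simp [hknt]
    · simp only [Function.comp, beq_iff_eq, hp]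
      by_cases hpt : p.1 ∈ t
      · simp [hpt, PySem.Dict.getD_insert, hp]
      · simp [hpt, hp]

-- one side of the result: A's dict built by the stone loop and rewritten per key
-- equals B's map over the first-occurrence-ordered distinct keys
theorem dict_side (stones : List (List Int)) (kf vf : List Int → Int) :
    (((stones.foldl (fun d s =>
        if d.contains (kf s) = false then d.insert (kf s) (PySem.Set.ofList [vf s])
        else d.modify (kf s) PySem.Set.empty (fun t => PySem.Set.add t (vf s)))
        PySem.Dict.empty).keys.foldl
        (fun d k => d.insert k (PySem.List.sorted (d.getD k PySem.Set.empty) (fun v => v)))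
        (stones.foldl (fun d s =>
        if d.contains (kf s) = false then d.insert (kf s) (PySem.Set.ofList [vf s])
        else d.modify (kf s) PySem.Set.empty (fun t => PySem.Set.add t (vf s)))
        PySem.Dict.empty)).items)
    = (PySem.Set.ofList (stones.map kf)).map
        (fun k => (k, PySem.List.sorted
          (PySem.Set.ofList ((stones.filter (fun s => kf s == k)).map vf)) (fun v => v))) := by
  have hAfold : (stones.foldl (fun d s =>
        if d.contains (kf s) = false then d.insert (kf s) (PySem.Set.ofList [vf s])
        else d.modify (kf s) PySem.Set.empty (fun t => PySem.Set.add t (vf s)))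
        PySem.Dict.empty)
      = stones.foldl (fun d s => d.modify (kf s) PySem.Set.empty
          (fun t => PySem.Set.add t (vf s))) PySem.Dict.empty :=
    PySem.List.foldl_congr_mem stones _ _ _
      (fun acc x _ => astep_eq_modify acc (kf x) (vf x))
  rw [hAfold]
  set Ad := stones.foldl (fun d s => d.modify (kf s) PySem.Set.empty
      (fun t => PySem.Set.add t (vf s))) PySem.Dict.empty with hAd
  have hkA : Ad.keys = PySem.Set.ofList (stones.map kf) := by
    rw [hAd, PySem.Dict.keys_foldl_modify_key stones kf PySem.Set.empty
      (fun d s t => PySem.Set.add t (vf s)) PySem.Dict.empty,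
      PySem.Dict.keys_empty, PySem.Set.update_nil_left]
  have hndA : Ad.keys.Nodup := by
    rw [hkA]; exact PySem.Set.nodup_ofList _
  have hgA : ∀ c, Ad.getD c [] = PySem.Set.ofList
      (((stones.filter (fun s => kf s == c)).map vf)) := by
    intro c
    rw [hAd]
    rw [show (fun (d : PySem.Dict Int (PySem.Set Int)) (s : List Int) =>
          d.modify (kf s) PySem.Set.empty (fun t => PySem.Set.add t (vf s)))
        = (fun d s => d.modify (kf s) [] (fun t => PySem.Set.add t (vf s))) from rfl]
    rw [getD_foldl_modify_general stones kf (fun t s => PySem.Set.add t (vf s))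
      PySem.Dict.empty c]
    rw [PySem.Dict.getD_empty, ← PySem.Set.update_map_eq_foldl_add,
      PySem.Set.update_nil_left]
  simp only [PySem.Set.empty]
  rw [items_foldl_rewrite Ad.keys Ad (fun v => PySem.List.sorted v (fun v => v))
      hndA (fun k hk => (PySem.Dict.contains_iff_mem_keys Ad k).mpr hk),
    PySem.Dict.items_eq_map_keys Ad hndA [], List.map_map, hkA]
  apply List.map_congr_left
  intro k hk
  simp only [Function.comp]
  rw [if_pos hk, hgA k]

-- ===== VERDICT (by name: the statement is the Claim_ definition above) =====
theorem build_row_col_index_spec : Claim_equal_build_row_col_index := by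
  intro stones _ _
  unfold Spec_build_row_col_index
  unfold build_row_col_index build_row_col_index_alt
  rw [PySem.List.foldl_prod_mk
      (f := fun (d : PySem.Dict Int (PySem.Set Int)) stone =>
        if d.contains (PySem.List.pyGetD stone 1 0) = false then
          d.insert (PySem.List.pyGetD stone 1 0) (PySem.Set.ofList [PySem.List.pyGetD stone 0 0])
        else d.modify (PySem.List.pyGetD stone 1 0) PySem.Set.empty
            (fun s => PySem.Set.add s (PySem.List.pyGetD stone 0 0)))
      (g := fun (d : PySem.Dict Int (PySem.Set Int)) stone =>
        if d.contains (PySem.List.pyGetD stone 0 0) = false then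
          d.insert (PySem.List.pyGetD stone 0 0) (PySem.Set.ofList [PySem.List.pyGetD stone 1 0])
        else d.modify (PySem.List.pyGetD stone 0 0) PySem.Set.empty
            (fun s => PySem.Set.add s (PySem.List.pyGetD stone 1 0)))]
  exact Prod.ext
    (dict_side stones (fun s => PySem.List.pyGetD s 1 0) (fun s => PySem.List.pyGetD s 0 0))
    (dict_side stones (fun s => PySem.List.pyGetD s 0 0) (fun s => PySem.List.pyGetD s 1 0))
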